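-- pv_equiv track=rewrite | github.com/JY-KIM0301/Algorithm | 2021study/programmers/level2/짝지어 제거하기.py | solution
-- ===== SOURCE A (Python) =====
-- def solution(s):
--
--     stack = list()
--
--     for x in s:
--         if len(stack) == 0:
--             stack.append(x)
--         else:
--             if stack[-1] == x:
--                 stack.pop()
--             else:
--                 stack.append(x)
--
--     if len(stack) == 0:
--         return 1
--     else:
--         return 0
-- ===== SOURCE B (Python) =====
-- def solution(s):
--     # Fixpoint reduction: repeatedly scan the string removing adjacent equal
--     # pairs (skip i,i+1 when t[i]==t[i+1]) until a full pass removes nothing.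
--     t = list(s)
--     changed = True
--     while changed:
--         changed = False
--         out = []
--         i = 0
--         while i < len(t):
--             if i + 1 < len(t) and t[i] == t[i + 1]:
--                 i += 2
--                 changed = True
--             else:
--                 out.append(t[i])
--                 i += 1
--         t = out
--     return 1 if not t else 0
-- ===== Notes on version B (the rewrite author's own statement) =====
-- stated objective: alternative
-- what changed: Replaces the single-pass stack cancellation with a fixpoint loop that repeatedly scans the string deleting adjacent equal pairs until a pass removes nothing; confluence of adjacent-pair deletion makes emptiness of the normal form agree with the stack result.
import Mathlib
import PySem

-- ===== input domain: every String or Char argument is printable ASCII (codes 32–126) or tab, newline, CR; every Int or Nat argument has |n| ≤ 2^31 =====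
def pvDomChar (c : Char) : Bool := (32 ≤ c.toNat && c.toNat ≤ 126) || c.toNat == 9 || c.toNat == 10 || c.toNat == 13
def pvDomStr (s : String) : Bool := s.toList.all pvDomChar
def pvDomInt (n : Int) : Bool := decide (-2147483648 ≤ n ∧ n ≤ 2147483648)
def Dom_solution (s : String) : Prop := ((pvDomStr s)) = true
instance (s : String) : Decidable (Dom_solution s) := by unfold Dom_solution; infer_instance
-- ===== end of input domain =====

-- B replaces A's single stack pass by a fixpoint loop that repeatedly deletes adjacent
-- equal pairs in left-to-right scans until a pass removes nothing (alternative algorithm,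
-- not faster); return values proved equal on all inputs.

-- ===== PORT A =====
-- The Python stack is kept top-first (stack[-1] = head); append/pop act on the head.
def stepA (stack : List Char) (x : Char) : List Char :=
  match stack with
  | [] => [x]                       -- len(stack) == 0: append
  | d :: t => if d = x then t       -- stack[-1] == x: pop
              else x :: d :: t      -- else: append

def solution (s : String) : Int :=
  let stack := s.toList.foldl stepA []
  if stack = [] then 1 else 0

-- ===== PORT B =====
-- one left-to-right pass of Source B's inner while loop: returns (out, changed)
def onePass : List Char → List Char × Bool
  | [] => ([], false)
  | [a] => ([a], false)
  | a :: b :: r =>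
    if a = b then ((onePass r).1, true)
    else ((a :: (onePass (b :: r)).1), (onePass (b :: r)).2)

-- termination fact for the outer while loop (a changed pass strictly shortens the list)
theorem onePass_length_lt : ∀ t : List Char,
    (onePass t).1.length ≤ t.length ∧ ((onePass t).2 = true → (onePass t).1.length < t.length) := by
  intro t
  induction t using onePass.induct with
  | case1 => simp [onePass]
  | case2 a => simp [onePass]
  | case3 b r ih =>
      have he : onePass (b :: b :: r) = ((onePass r).1, true) := by simp [onePass]
      rw [he]
      exact ⟨by have := ih.1; simp at this ⊢; omega, fun _ => by have := ih.1; simp at this ⊢; omega⟩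
  | case4 a b r h ih =>
      simp only [onePass, if_neg h]
      exact ⟨by simpa using ih.1, fun hc => by simpa using ih.2 hc⟩

-- Source B's outer while loop: repeat passes while a pass removed something
def loopB (t : List Char) : List Char :=
  if h : (onePass t).2 = true then loopB (onePass t).1 else t
termination_by t.length
decreasing_by exact (onePass_length_lt t).2 h

def solution_alt (s : String) : Int :=
  if loopB s.toList = [] then 1 else 0

-- ===== PRECONDITION & SPEC =====
def Spec_solution (s : String) (out : Int) : Prop := out = solution_alt s
instance (s : String) (out : Int) : Decidable (Spec_solution s out) := by unfold Spec_solution; infer_instance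

-- ===== CLAIM (what is proved, stated in full; the proofs are below) =====
def Claim_equal_solution : Prop := ∀ (s : String), Dom_solution s → Spec_solution s (solution s)

-- ===== LEMMAS AND PROOFS =====

-- stepA preserves irreducibility of the stack (no two adjacent equal chars)
theorem stepA_chain {st : List Char} (h : List.IsChain Ne st) (x : Char) :
    List.IsChain Ne (stepA st x) := by
  match st with
  | [] => simp [stepA]
  | d :: t =>
      by_cases hdx : d = x
      · simp only [stepA, if_pos hdx]
        exact (List.isChain_cons.mp h).2
      · simp only [stepA, if_neg hdx]
        exact List.isChain_cons.mpr ⟨by intro y hy; simp at hy; subst hy; exact fun e => hdx e.symm, h⟩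

-- cancellation: pushing x twice onto an irreducible stack is the identity
theorem stepA_cancel {st : List Char} (h : List.IsChain Ne st) (x : Char) :
    stepA (stepA st x) x = st := by
  match st with
  | [] => simp [stepA]
  | d :: t =>
      by_cases hdx : d = x
      · subst hdx
        match t, h with
        | [], _ => simp [stepA]
        | e :: t', h =>
            have hde : d ≠ e := (List.isChain_cons.mp h).1 e (by simp)
            have hed : ¬ e = d := fun hh => hde hh.symm
            simp [stepA, hed]
      · simp [stepA, hdx]

-- a one-pass removal does not change the stack fold (from any irreducible stack)
theorem foldl_onePass : ∀ (t : List Char) (st : List Char), List.IsChain Ne st →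
    List.foldl stepA st (onePass t).1 = List.foldl stepA st t := by
  intro t
  induction t using onePass.induct with
  | case1 => intro st _; simp [onePass]
  | case2 a => intro st _; simp [onePass]
  | case3 b r ih =>
      intro st hst
      have he : (onePass (b :: b :: r)).1 = (onePass r).1 := by simp [onePass]
      rw [he, List.foldl_cons, List.foldl_cons, stepA_cancel hst, ih st hst]
  | case4 a b r h ih =>
      intro st hst
      simp only [onePass, if_neg h, List.foldl_cons]
      exact ih (stepA st a) (stepA_chain hst a)

-- the fixpoint loop does not change the stack fold
theorem foldl_loopB : ∀ t : List Char,
    List.foldl stepA [] (loopB t) = List.foldl stepA [] t := by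
  intro t
  induction t using loopB.induct with
  | case1 t h ih =>
      rw [loopB, dif_pos h, ih, foldl_onePass t [] (by simp)]
  | case2 t h =>
      rw [loopB, dif_neg h]

-- when a pass removes nothing, the list was already irreducible
theorem onePass_unchanged_chain : ∀ t : List Char,
    (onePass t).2 = false → List.IsChain Ne t := by
  intro t
  induction t using onePass.induct with
  | case1 => intro _; simp
  | case2 a => intro _; simp
  | case3 b r ih => intro hc; simp [onePass] at hc
  | case4 a b r h ih =>
      intro hc
      simp only [onePass, if_neg h] at hc
      exact List.isChain_cons.mpr ⟨by intro y hy; simp at hy; subst hy; exact h, ih hc⟩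

-- the result of the loop is irreducible
theorem loopB_chain : ∀ t : List Char, List.IsChain Ne (loopB t) := by
  intro t
  induction t using loopB.induct with
  | case1 t h ih => rwa [loopB, dif_pos h]
  | case2 t h =>
      rw [loopB, dif_neg h]
      exact onePass_unchanged_chain t (by simpa using h)

-- folding an irreducible list only pushes: the stack becomes its reverse
theorem foldl_chain : ∀ (u : List Char) (st : List Char), List.IsChain Ne u →
    (∀ h d, u.head? = some h → st.head? = some d → d ≠ h) →
    List.foldl stepA st u = u.reverse ++ st := by
  intro u
  induction u with
  | nil => intro st _ _; simp
  | cons x r ih =>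
      intro st hc hhd
      have hstep : stepA st x = x :: st := by
        match st with
        | [] => simp [stepA]
        | d :: t => simp [stepA, hhd x d rfl rfl]
      rw [List.foldl_cons, hstep,
          ih (x :: st) (List.isChain_cons.mp hc).2 (fun h d hh hd => by
            simp only [List.head?_cons, Option.some.injEq] at hd
            subst hd
            exact (List.isChain_cons.mp hc).1 h (by simp [hh]))]
      simp

-- ===== VERDICT (by name: the statement is the Claim_ definition above) =====
theorem solution_spec : Claim_equal_solution := by
  intro s _
  unfold Spec_solution solution solution_alt
  have hfix := foldl_loopB s.toList
  have hchain := loopB_chain s.toList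
  have hfold : List.foldl stepA [] (loopB s.toList) = (loopB s.toList).reverse := by
    simpa using foldl_chain (loopB s.toList) [] hchain (by simp)
  by_cases hempty : loopB s.toList = []
  · simp only [hempty]
    rw [← hfix, hempty]
    simp
  · have : List.foldl stepA [] s.toList ≠ [] := by
      rw [← hfix, hfold]
      simpa using hempty
    simp [this, hempty]
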